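-- pv_equiv track=rewrite | github.com/stanfordnlp/chirpycardinal | chirpy/core/entity_linker/util.py | get_singular_versions
-- ===== SOURCE A (Python) =====
-- from typing import Set, Dict, List
-- from typing import Optional
--
-- def singularize_pluralnoun(token: dict) -> Optional[str]:
--     """
--     Input:
--         token: A dict representing the token (with keys 'originalText', 'lemma', 'pos'), as given by corenlp.
--             If we didn't run corenlp, just has key 'originalText'.
--     Return:
--          If token is a plural noun (NNS), and we can obtain a singular version that's different to the originalText
--          (either by using the lemma, or by removing 's'), return the singular version. Otherwise, return None.
--     """
--     pos_tag = token.get('pos', None)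
--     lemma = token.get('lemma', None)
--
--     # If we have the pos tag and it's not plural noun, return None
--     if pos_tag is not None and pos_tag != 'NNS':
--         return None
--
--     # If we have the lemma and it's different to the original text, return the lemma
--     if lemma is not None and lemma != token['originalText']:
--         return token['lemma']
--
--     # If the originalText ends with s, return the version without the s
--     if token['originalText'].endswith('s'):
--         singular = token['originalText'][:-1]
--         if singular:
--             return singular
--
--     return None
--
-- def get_singular_versions(span: str, corenlp_tokens: List[dict]) -> Set[str]:
--     """
--     If span contains any plural nouns (and is length 3 or less), return a list of alternative versions, that
--     singularize the plural nouns.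
--
--     e.g. 'golden retrievers' -> {'golden retriever'}
--
--     @param span: a span in the user's utterance
--     @param corenlp_tokens: List of dicts, each representing a token, from the corenlp annotator.
--     @return: set of alternative forms of span
--     """
--     corenlp_origtoken2tokeninfo = {token['originalText']: token for token in corenlp_tokens}  # str -> dict
--     span_tokens = span.split()  # list of strings
--
--     # To avoid generating too many candidate spans (which makes the ES query slower), only singularize spans of 3 or
--     # fewer words. Most entities of length 4 or more are titles of e.g. movies/books which users don't tend to pluralize
--     if len(span_tokens) > 3:
--         return set()
--
--     # For span tokens that are plural nouns, singularize them
--     singularized_spantokens = [singularize_pluralnoun(corenlp_origtoken2tokeninfo.get(t, {'originalText': t})) for t in span_tokens]  # list of str/None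
--
--     # Get a list of versions of span_tokens, with all possible combinations of the original/singularized plural nouns
--     versions = [span_tokens]  # list of list of strings
--     for (orig_token, singularized_token) in zip(span_tokens, singularized_spantokens):
--
--         # If orig_token has no singularized version, continue
--         if singularized_token is None:
--             continue
--
--         # For each version in versions, make a version that has singularized_token instead of orig_token
--         new_versions = []
--         for version in versions:
--             new_version = [t if t != orig_token else singularized_token for t in version]
--             new_versions.append(new_version)
--         versions += new_versions
--
--     versions = {' '.join(version) for version in versions}  # set of str
--     return versions
-- ===== SOURCE B (Python) =====
-- from typing import Set, List, Optional
--
-- def singularize_pluralnoun(token: dict) -> Optional[str]: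
--     pos_tag = token.get('pos', None)
--     lemma = token.get('lemma', None)
--     if pos_tag is not None and pos_tag != 'NNS':
--         return None
--     if lemma is not None and lemma != token['originalText']:
--         return token['lemma']
--     if token['originalText'].endswith('s'):
--         singular = token['originalText'][:-1]
--         if singular:
--             return singular
--     return None
--
-- def get_singular_versions(span: str, corenlp_tokens: List[dict]) -> Set[str]:
--     span_tokens = span.split()
--     if len(span_tokens) > 3:
--         return set()
--     info = {t['originalText']: t for t in corenlp_tokens}
--     # one (original, singular) replacement pair per span position that has a singular form
--     reps = []
--     for t in span_tokens:
--         s = singularize_pluralnoun(info.get(t, {'originalText': t}))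
--         if s is not None:
--             reps.append((t, s))
--     # enumerate every subset of the replacements directly (bitmask), applying
--     # the chosen replacements across the whole span in position order
--     result = set()
--     for mask in range(1 << len(reps)):
--         version = span_tokens
--         for j, (orig, sing) in enumerate(reps):
--             if (mask >> j) & 1:
--                 version = [sing if t == orig else t for t in version]
--         result.add(' '.join(version))
--     return result
-- ===== Notes on version B (the rewrite author's own statement) =====
-- stated objective: alternative
-- what changed: Instead of growing a doubling list of intermediate versions (appending a replaced copy of every version so far for each singularizable position, reprocessing duplicates) and deduplicating at the end, B collects one (original, singular) replacement pair per span position and enumerates every subset of them directly by bitmask, applying the chosen replacements across the span in position order and adding each joined result to the set.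
import Mathlib
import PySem

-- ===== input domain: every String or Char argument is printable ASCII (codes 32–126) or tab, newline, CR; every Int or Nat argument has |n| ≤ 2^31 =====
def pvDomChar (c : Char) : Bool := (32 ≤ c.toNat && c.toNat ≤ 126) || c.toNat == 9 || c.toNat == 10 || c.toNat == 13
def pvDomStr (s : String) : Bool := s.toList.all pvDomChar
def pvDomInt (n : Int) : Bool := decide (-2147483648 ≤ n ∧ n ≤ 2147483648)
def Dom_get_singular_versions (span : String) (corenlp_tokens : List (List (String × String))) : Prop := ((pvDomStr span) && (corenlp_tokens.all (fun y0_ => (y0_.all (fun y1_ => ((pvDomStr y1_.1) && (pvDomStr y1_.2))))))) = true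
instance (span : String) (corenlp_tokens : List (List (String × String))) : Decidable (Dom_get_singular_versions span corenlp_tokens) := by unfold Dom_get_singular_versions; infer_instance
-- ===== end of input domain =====

-- B enumerates the subsets of the per-position replacements directly by bitmask instead of
-- growing a doubling list of intermediate versions; alternative decomposition, same result set.

-- ===== PORT A =====

-- shared helper of both Pythons; token['originalText'] is read with getD "" — exact whenever the
-- key is present, which Pre_ (or the {'originalText': t} default dict) guarantees
def singularize_pluralnoun (token : List (String × String)) : Option String :=
  let pos_tag := (PySem.Dict.mk token).get? "pos"
  let lemma_ := (PySem.Dict.mk token).get? "lemma"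
  if pos_tag != none && pos_tag != some "NNS" then none
  else if lemma_ != none && lemma_ != some (((PySem.Dict.mk token).get? "originalText").getD "") then lemma_
  else
    let origText := ((PySem.Dict.mk token).get? "originalText").getD ""
    if PySem.Str.endswith origText "s" then
      let singular := PySem.Str.slice origText none (some (-1))
      if singular != "" then some singular else none
    else none

def get_singular_versions (span : String) (corenlp_tokens : List (List (String × String))) : List String :=
  let corenlp_origtoken2tokeninfo : PySem.Dict String (List (String × String)) :=
    corenlp_tokens.foldl (fun d token => d.insert (((PySem.Dict.mk token).get? "originalText").getD "") token) PySem.Dict.empty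
  let span_tokens := PySem.Str.split₀ span
  if span_tokens.length > 3 then []
  else
    let singularized_spantokens := span_tokens.map (fun t =>
      singularize_pluralnoun ((corenlp_origtoken2tokeninfo.get? t).getD [("originalText", t)]))
    let versions : List (List String) :=
      (span_tokens.zip singularized_spantokens).foldl (fun versions p =>
        match p.2 with
        | none => versions
        | some s => versions ++ versions.map (fun version => version.map (fun t => if t != p.1 then t else s)))
        [span_tokens]
    PySem.Set.ofList (versions.map (fun version => PySem.Str.join " " version))

-- ===== PORT B =====

-- inner loop of B: for j, (orig, sing) in enumerate(reps): if (mask >> j) & 1: replace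
def pvApplyMask (reps : List (String × String)) (mask : Nat) (j : Nat) (version : List String) : List String :=
  match reps with
  | [] => version
  | p :: rest =>
      pvApplyMask rest mask (j + 1)
        (if (mask >>> j) &&& 1 == 1 then version.map (fun t => if t == p.1 then p.2 else t) else version)

def get_singular_versions_alt (span : String) (corenlp_tokens : List (List (String × String))) : List String :=
  let span_tokens := PySem.Str.split₀ span
  if span_tokens.length > 3 then []
  else
    let info : PySem.Dict String (List (String × String)) :=
      corenlp_tokens.foldl (fun d token => d.insert (((PySem.Dict.mk token).get? "originalText").getD "") token) PySem.Dict.empty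
    let reps : List (String × String) :=
      span_tokens.foldl (fun acc t =>
        match singularize_pluralnoun ((info.get? t).getD [("originalText", t)]) with
        | some s => acc ++ [(t, s)]
        | none => acc) []
    (PySem.List.pyRange 0 ((1 <<< reps.length : Nat) : Int) 1).foldl
      (fun result mask => PySem.Set.add result (PySem.Str.join " " (pvApplyMask reps mask.toNat 0 span_tokens)))
      PySem.Set.empty

-- ===== PRECONDITION & SPEC =====
-- Pre_ excludes exactly the inputs on which the Python raises KeyError: a corenlp token dict
-- without the key 'originalText' (both dict comprehensions index token['originalText']).
def Pre_get_singular_versions (span : String) (corenlp_tokens : List (List (String × String))) : Prop :=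
  ∀ token ∈ corenlp_tokens, (PySem.Dict.mk token).contains "originalText" = true
instance (span : String) (corenlp_tokens : List (List (String × String))) : Decidable (Pre_get_singular_versions span corenlp_tokens) := by unfold Pre_get_singular_versions; infer_instance
def pvWitness_get_singular_versions : String × (List (List (String × String))) :=
  ("golden retrievers", [[("originalText", "retrievers"), ("pos", "NNS"), ("lemma", "retriever")]])

def Spec_get_singular_versions (span : String) (corenlp_tokens : List (List (String × String))) (out : List String) : Prop := out = get_singular_versions_alt span corenlp_tokens
instance (span : String) (corenlp_tokens : List (List (String × String))) (out : List String) : Decidable (Spec_get_singular_versions span corenlp_tokens out) := by unfold Spec_get_singular_versions; infer_instance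

-- ===== CLAIM (what is proved, stated in full; the proofs are below) =====
def Claim_equal_get_singular_versions : Prop := ∀ (span : String) (corenlp_tokens : List (List (String × String))), Dom_get_singular_versions span corenlp_tokens → Pre_get_singular_versions span corenlp_tokens → Spec_get_singular_versions span corenlp_tokens (get_singular_versions span corenlp_tokens)

-- ===== LEMMAS AND PROOFS =====

-- replace every occurrence of o by s
def pvRep (o s : String) (v : List String) : List String := v.map (fun t => if t != o then t else s)

-- apply, low bit first, the replacements selected by the bits of m
def pvGo (reps : List (String × String)) (m : Nat) (v : List String) : List String :=
  match reps with
  | [] => v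
  | p :: rest => pvGo rest (m / 2) (if m % 2 == 1 then pvRep p.1 p.2 v else v)

def pvStep (vs : List (List String)) (p : String × String) : List (List String) :=
  vs ++ vs.map (pvRep p.1 p.2)

theorem pvRep_flip (o s : String) (v : List String) :
    v.map (fun t => if t == o then s else t) = pvRep o s v := by
  unfold pvRep
  apply List.map_congr_left
  intro t _
  by_cases h : t = o <;> simp [h]

theorem pvApplyMask_eq (reps : List (String × String)) (mask : Nat) :
    ∀ (j : Nat) (v : List String), pvApplyMask reps mask j v = pvGo reps (mask >>> j) v := by
  induction reps with
  | nil => intro j v; rfl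
  | cons p rest ih =>
      intro j v
      rw [pvApplyMask, ih, pvGo, ← Nat.shiftRight_succ, Nat.and_one_is_mod, pvRep_flip]

theorem pvRange_double (n : Nat) :
    List.range (2 * n) = (List.range n).flatMap (fun q => [2 * q, 2 * q + 1]) := by
  induction n with
  | zero => rfl
  | succ n ih =>
      have h : 2 * (n + 1) = (2 * n + 1) + 1 := by omega
      rw [h, List.range_succ, List.range_succ, ih, List.range_succ]
      simp

theorem pvGo_even (p : String × String) (rest : List (String × String)) (q : Nat) (v : List String) :
    pvGo (p :: rest) (2 * q) v = pvGo rest q v := by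
  rw [pvGo]
  have h1 : (2 * q) % 2 = 0 := by omega
  have h2 : (2 * q) / 2 = q := by omega
  simp [h1, h2]

theorem pvGo_odd (p : String × String) (rest : List (String × String)) (q : Nat) (v : List String) :
    pvGo (p :: rest) (2 * q + 1) v = pvGo rest q (pvRep p.1 p.2 v) := by
  rw [pvGo]
  have h1 : (2 * q + 1) % 2 = 1 := by omega
  have h2 : (2 * q + 1) / 2 = q := by omega
  simp [h1, h2]

theorem pvFold_eq_flatMap (reps : List (String × String)) :
    ∀ (seeds : List (List String)),
      List.foldl pvStep seeds reps
        = (List.range (2 ^ reps.length)).flatMap (fun m => seeds.map (pvGo reps m)) := by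
  induction reps with
  | nil =>
      intro seeds
      simp [pvGo]
  | cons p rest ih =>
      intro seeds
      have hpow : 2 ^ (p :: rest).length = 2 * 2 ^ rest.length := by
        simp [List.length_cons, pow_succ]; ring
      rw [List.foldl_cons, ih, hpow, pvRange_double, List.flatMap_assoc]
      apply List.flatMap_congr
      intro q _
      have he : pvGo (p :: rest) (2 * q) = pvGo rest q := funext (pvGo_even p rest q)
      have ho : pvGo (p :: rest) (2 * q + 1) = fun v => pvGo rest q (pvRep p.1 p.2 v) :=
        funext (pvGo_odd p rest q)
      simp only [List.flatMap_cons, List.flatMap_nil, List.append_nil, he, ho,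
        pvStep, List.map_append, List.map_map]
      rfl

-- skipping the None entries of A's zip is folding pvStep over the filtered pair list
theorem pvFoldA (pairs : List (String × Option String)) :
    ∀ (vs : List (List String)),
      pairs.foldl (fun versions p =>
          match p.2 with
          | none => versions
          | some s => versions ++ versions.map (fun version => version.map (fun t => if t != p.1 then t else s)))
        vs
      = (pairs.filterMap (fun p => p.2.map (fun s => (p.1, s)))).foldl pvStep vs := by
  induction pairs with
  | nil => intro vs; rfl
  | cons p rest ih =>
      intro vs
      obtain ⟨a, o⟩ := p
      cases o with
      | none =>
          simp only [List.foldl_cons, List.filterMap_cons, Option.map_none]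
          exact ih vs
      | some s =>
          simp only [List.foldl_cons, List.filterMap_cons, Option.map_some]
          exact ih _

-- B's append-build of reps is a filterMap
theorem pvRepsBuild (f : String → Option String) (l : List String) :
    ∀ (acc : List (String × String)),
      l.foldl (fun acc t =>
          match f t with
          | some s => acc ++ [(t, s)]
          | none => acc) acc
      = acc ++ l.filterMap (fun t => (f t).map (fun s => (t, s))) := by
  induction l with
  | nil => intro acc; simp
  | cons a rest ih =>
      intro acc
      cases h : f a <;> simp [h, ih]

theorem pvZipMap {α β : Type} (l : List α) (f : α → β) :
    l.zip (l.map f) = l.map fun t => (t, f t) := by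
  induction l with
  | nil => rfl
  | cons a rest ih => simp [ih]

theorem pvFlatMapSingle {α β : Type} (l : List α) (h : α → β) :
    l.flatMap (fun m => [h m]) = l.map h := by
  induction l with
  | nil => rfl
  | cons a rest ih => simp [ih]

-- ===== VERDICT (by name: the statement is the Claim_ definition above) =====
theorem get_singular_versions_spec : Claim_equal_get_singular_versions := by
  intro span corenlp_tokens _ _
  unfold Spec_get_singular_versions get_singular_versions get_singular_versions_alt
  simp only []
  set D := corenlp_tokens.foldl (fun d token => d.insert (((PySem.Dict.mk token).get? "originalText").getD "") token) PySem.Dict.empty with hD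
  set st := PySem.Str.split₀ span with hst
  by_cases hlen : st.length > 3
  · simp [hlen]
  · simp only [hlen, if_false]
    set f := fun t => singularize_pluralnoun ((D.get? t).getD [("originalText", t)]) with hf
    set reps := st.filterMap (fun t => (f t).map (fun s => (t, s))) with hreps
    have hA : (st.zip (st.map f)).foldl (fun versions p =>
          match p.2 with
          | none => versions
          | some s => versions ++ versions.map (fun version => version.map (fun t => if t != p.1 then t else s)))
        [st] = (List.range (2 ^ reps.length)).flatMap (fun m => [st].map (pvGo reps m)) := by
      rw [pvFoldA, pvZipMap, List.filterMap_map, ← pvFold_eq_flatMap]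
      rfl
    have hB : st.foldl (fun acc t =>
          match f t with
          | some s => acc ++ [(t, s)]
          | none => acc) [] = reps := by
      rw [pvRepsBuild, List.nil_append]
    rw [hA, hB]
    have hL : (((List.range (2 ^ reps.length)).flatMap fun m => [st].map (pvGo reps m)).map
          fun version => PySem.Str.join " " version)
        = (List.range (2 ^ reps.length)).map fun m => PySem.Str.join " " (pvGo reps m st) := by
      simp only [List.map_cons, List.map_nil]
      rw [pvFlatMapSingle (h := fun m => pvGo reps m st), List.map_map]
      rfl
    have hB2 : ∀ (N : Nat),
        (PySem.List.pyRange 0 (N : Int) 1).foldl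
          (fun result mask => PySem.Set.add result (PySem.Str.join " " (pvApplyMask reps mask.toNat 0 st)))
          PySem.Set.empty
        = PySem.Set.ofList ((List.range N).map fun m => PySem.Str.join " " (pvGo reps m st)) := by
      intro N
      induction N with
      | zero => rfl
      | succ N ih =>
          have hcast : ((N + 1 : Nat) : Int) = (N : Int) + 1 := by push_cast; ring
          rw [hcast, PySem.List.pyRange_one_succ_right (Int.natCast_nonneg N),
            List.foldl_append, ih, List.range_succ, List.map_append, List.map_cons, List.map_nil,
            PySem.Set.ofList_append_singleton]
          simp only [List.foldl_cons, List.foldl_nil, Int.toNat_natCast]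
          rw [pvApplyMask_eq, Nat.shiftRight_zero]
    have hsh : (1 <<< reps.length) = 2 ^ reps.length := Nat.one_shiftLeft _
    rw [hL, hB2 (1 <<< reps.length), hsh]
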